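-- pv_equiv track=rewrite | github.com/ChenYangyao/dwarf_assembly_bias | docs/code_samples/myfuncs.py | ave_split
-- ===== SOURCE A (Python) =====
-- def ave_split(Nbin,para):
--     para1 =sorted(para)
--     leng = len(para)
--     step = leng//Nbin
--     inter=[]
--     """
--     for i in range(Nbin+1):
--         if 0<i<Nbin:
--             inter.append(para1[i*step])
--         elif i==Nbin:
--             inter.append(para1[i*step-1])
--         elif i==0:
--             inter.append(para1[0])
--     """
--
--     for i in range(Nbin+1):
--         if i!=0:
--             inter.append(para1[i*step-1])
--         else:
--             inter.append(para1[0])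
--
--     idss = [[]]*Nbin
--     for i in range(Nbin):
--         tem = []
--         for j in range(len(para)):
--             if inter[i] <= para[j] <inter[i+1]:
--                 tem.append(j)
--         idss[i]=tem
--     return inter,idss
-- ===== SOURCE B (Python) =====
-- def ave_split(Nbin, para):
--     if Nbin <= 0:
--         return [], []
--     para1 = sorted(para)
--     step = len(para) // Nbin
--     inter = [para1[0]] + [para1[i * step - 1] for i in range(1, Nbin + 1)]
--     idss = [[] for _ in range(Nbin)]
--     for j in range(len(para)):
--         x = para[j]
--         lo, hi = 0, len(inter)  # hand-written bisect_right(inter, x)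
--         while lo < hi:
--             mid = (lo + hi) // 2
--             if x < inter[mid]:
--                 hi = mid
--             else:
--                 lo = mid + 1
--         i = lo - 1
--         if 0 <= i < Nbin:
--             idss[i].append(j)
--     return inter, idss
-- ===== Notes on version B (the rewrite author's own statement) =====
-- stated objective: faster
-- what changed: A rescans all N values once per bin (Nbin nested passes); B makes a single pass over the values and assigns each to its bin with a hand-written binary search on the sorted boundary list.
import Mathlib
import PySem

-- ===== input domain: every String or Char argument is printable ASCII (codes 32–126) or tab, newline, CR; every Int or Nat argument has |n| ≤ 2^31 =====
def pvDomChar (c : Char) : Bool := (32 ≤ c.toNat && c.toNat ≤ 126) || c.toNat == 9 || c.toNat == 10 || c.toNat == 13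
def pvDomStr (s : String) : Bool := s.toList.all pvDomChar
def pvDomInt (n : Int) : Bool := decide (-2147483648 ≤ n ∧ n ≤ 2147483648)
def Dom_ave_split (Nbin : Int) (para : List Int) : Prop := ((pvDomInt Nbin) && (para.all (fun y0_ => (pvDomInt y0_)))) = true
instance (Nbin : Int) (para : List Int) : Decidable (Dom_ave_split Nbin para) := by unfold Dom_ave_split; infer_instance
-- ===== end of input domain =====

-- B replaces A's per-bin rescan of all values by one pass over the values with a
-- hand-written binary search on the sorted boundary list.
-- ===== PORT A =====
def ave_split (Nbin : Int) (para : List Int) : List Int × List (List Int) :=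
  let para1 := PySem.List.sorted para (fun x => x) false
  let leng : Int := para.length
  let step := PySem.Int.floordiv leng Nbin
  let inter := (PySem.List.pyRange 0 (Nbin+1) 1).foldl (fun acc i =>
      if i ≠ 0 then acc ++ [PySem.List.pyGetD para1 (i*step-1) 0]
      else acc ++ [PySem.List.pyGetD para1 0 0]) []
  let idss := (PySem.List.pyRange 0 Nbin 1).foldl (fun idss i =>
      let tem := (PySem.List.pyRange 0 leng 1).foldl (fun tem j =>
          if PySem.List.pyGetD inter i 0 ≤ PySem.List.pyGetD para j 0 ∧
             PySem.List.pyGetD para j 0 < PySem.List.pyGetD inter (i+1) 0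
          then tem ++ [j] else tem) ([] : List Int)
      PySem.List.pySetD idss i tem) (List.replicate Nbin.toNat ([] : List Int))
  (inter, idss)

-- ===== PORT B =====
-- the while-loop in Source B is exactly Python's bisect_right, ported as PySem.List.bisectRight
def ave_split_alt (Nbin : Int) (para : List Int) : List Int × List (List Int) :=
  if Nbin ≤ 0 then ([], [])
  else
    let para1 := PySem.List.sorted para (fun x => x) false
    let step := PySem.Int.floordiv (para.length : Int) Nbin
    let inter := PySem.List.pyGetD para1 0 0 ::
      (PySem.List.pyRange 1 (Nbin+1) 1).map (fun i => PySem.List.pyGetD para1 (i*step-1) 0)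
    let idss := (PySem.List.pyRange 0 (para.length : Int) 1).foldl (fun acc j =>
        let x := PySem.List.pyGetD para j 0
        let i : Int := (PySem.List.bisectRight inter x : Int) - 1
        if 0 ≤ i ∧ i < Nbin then
          PySem.List.pySetD acc i (PySem.List.pyGetD acc i ([] : List Int) ++ [j])
        else acc) ((PySem.List.pyRange 0 Nbin 1).map (fun _ => ([] : List Int)))
    (inter, idss)

-- ===== PRECONDITION & SPEC =====
-- Pre_ excludes exactly the inputs where the Python A raises: Nbin = 0 (ZeroDivisionError)
-- and empty para with Nbin > 0 (IndexError on para1[0]).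
def Pre_ave_split (Nbin : Int) (para : List Int) : Prop :=
  Nbin < 0 ∨ (0 < Nbin ∧ para ≠ [])
instance (Nbin : Int) (para : List Int) : Decidable (Pre_ave_split Nbin para) := by
  unfold Pre_ave_split; infer_instance
def pvWitness_ave_split : Int × List Int := (2, [3, 1, 2, 5])

def Spec_ave_split (Nbin : Int) (para : List Int) (out : List Int × List (List Int)) : Prop := out = ave_split_alt Nbin para
instance (Nbin : Int) (para : List Int) (out : List Int × List (List Int)) : Decidable (Spec_ave_split Nbin para out) := by unfold Spec_ave_split; infer_instance

-- ===== CLAIM (what is proved, stated in full; the proofs are below) =====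
def Claim_equal_ave_split : Prop := ∀ (Nbin : Int) (para : List Int), Dom_ave_split Nbin para → Pre_ave_split Nbin para → Spec_ave_split Nbin para (ave_split Nbin para)

-- ===== LEMMAS AND PROOFS =====

-- the shared boundary list (B's form of `inter`), named for the proofs below
def pvInter (Nbin : Int) (para : List Int) : List Int :=
  PySem.List.pyGetD (PySem.List.sorted para (fun x => x) false) 0 0 ::
    (PySem.List.pyRange 1 (Nbin+1) 1).map (fun i =>
      PySem.List.pyGetD (PySem.List.sorted para (fun x => x) false)
        (i * PySem.Int.floordiv (para.length : Int) Nbin - 1) 0)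

-- A's `inter` loop produces pvInter
lemma interA_eq (Nbin : Int) (para : List Int) (h : 0 < Nbin) :
    (PySem.List.pyRange 0 (Nbin+1) 1).foldl (fun acc i =>
        if i ≠ 0 then acc ++ [PySem.List.pyGetD (PySem.List.sorted para (fun x => x) false)
            (i * PySem.Int.floordiv (para.length : Int) Nbin - 1) 0]
        else acc ++ [PySem.List.pyGetD (PySem.List.sorted para (fun x => x) false) 0 0]) []
      = pvInter Nbin para := by
  have hfun : (fun (acc : List Int) (i : Int) =>
        if i ≠ 0 then acc ++ [PySem.List.pyGetD (PySem.List.sorted para (fun x => x) false)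
            (i * PySem.Int.floordiv (para.length : Int) Nbin - 1) 0]
        else acc ++ [PySem.List.pyGetD (PySem.List.sorted para (fun x => x) false) 0 0])
      = fun acc i => acc ++ [if i ≠ 0 then PySem.List.pyGetD (PySem.List.sorted para (fun x => x) false)
            (i * PySem.Int.floordiv (para.length : Int) Nbin - 1) 0
        else PySem.List.pyGetD (PySem.List.sorted para (fun x => x) false) 0 0] := by
    funext acc i; by_cases hi : i ≠ 0 <;> simp [hi]
  rw [hfun, PySem.List.foldl_append_singleton_eq_map, List.nil_append,
      PySem.List.pyRange_one_cons (by omega : (0:Int) < Nbin + 1), List.map_cons,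
      if_neg (by simp)]
  unfold pvInter
  congr 1
  apply List.map_congr_left
  intro i hi
  rw [PySem.List.mem_pyRange_one] at hi
  rw [if_pos (by omega)]

-- the boundaries are nondecreasing
lemma pvInter_pairwise (Nbin : Int) (para : List Int) (h : 0 < Nbin) (hne : para ≠ []) :
    (pvInter Nbin para).Pairwise (· ≤ ·) := by
  set para1 := PySem.List.sorted para (fun x => x) false with hp1
  set s := PySem.Int.floordiv (para.length : Int) Nbin with hs
  have hlen1 : para1.length = para.length := PySem.List.length_sorted para _ false
  have hne1 : para1 ≠ [] := fun hnil =>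
    hne ((PySem.List.sorted_eq_nil_iff para _ false).mp hnil)
  have hL : 0 < para.length := List.length_pos_iff.mpr hne
  have hs0 : 0 ≤ s := by
    rw [hs]
    have := (PySem.Int.le_floordiv_iff_mul_le (a := (para.length : Int)) (q := 0) h).mpr (by omega)
    exact this
  have hNs : Nbin * s ≤ (para.length : Int) := by
    have := (PySem.Int.le_floordiv_iff_mul_le (a := (para.length : Int)) (q := s) h).mp (le_refl s)
    rw [mul_comm]; exact this
  -- the element A reads for boundary i, as a getElem of para1
  have hg : ∀ i : Int, 1 ≤ i → i ≤ Nbin → ∃ k : Nat, k < para1.length ∧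
      (∀ hk : k < para1.length, PySem.List.pyGetD para1 (i*s-1) 0 = para1[k]) ∧
      ((s = 0 ∧ k = para1.length - 1) ∨ (1 ≤ s ∧ (k : Int) = i*s-1)) := by
    intro i hi1 hi2
    by_cases hz : s = 0
    · refine ⟨para1.length - 1, by omega, ?_, Or.inl ⟨hz, rfl⟩⟩
      intro hk
      have : i * s - 1 = -1 := by rw [hz]; ring
      rw [this, PySem.List.pyGetD_neg_one para1 0 hne1, List.getLast_eq_getElem]
    · have hs1 : 1 ≤ s := by omega
      have hlow : 1 ≤ i * s := by nlinarith
      have hhigh : i * s ≤ Nbin * s := by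
        apply mul_le_mul_of_nonneg_right hi2 hs0
      refine ⟨(i*s-1).toNat, by omega, ?_, Or.inr ⟨hs1, by omega⟩⟩
      intro hk
      exact PySem.List.pyGetD_eq_getElem para1 0 (by omega) (by omega)
  have hmono : ∀ i1 i2 : Int, 1 ≤ i1 → i1 ≤ i2 → i2 ≤ Nbin →
      PySem.List.pyGetD para1 (i1*s-1) 0 ≤ PySem.List.pyGetD para1 (i2*s-1) 0 := by
    intro i1 i2 h1 h2 h3
    obtain ⟨k1, hk1, he1, hc1⟩ := hg i1 h1 (by omega)
    obtain ⟨k2, hk2, he2, hc2⟩ := hg i2 (by omega) h3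
    rw [he1 hk1, he2 hk2]
    have hk12 : k1 ≤ k2 := by
      rcases hc1 with ⟨hz, hk1e⟩ | ⟨hs1, hk1e⟩ <;> rcases hc2 with ⟨hz2, hk2e⟩ | ⟨hs2, hk2e⟩
      · omega
      · omega
      · omega
      · have : i1 * s ≤ i2 * s := mul_le_mul_of_nonneg_right h2 hs0
        omega
    exact PySem.List.sorted_id_getElem_mono para hk12 (by rw [hp1] at hk2; exact hk2)
  have hbase : ∀ i : Int, 1 ≤ i → i ≤ Nbin →
      PySem.List.pyGetD para1 0 0 ≤ PySem.List.pyGetD para1 (i*s-1) 0 := by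
    intro i h1 h2
    obtain ⟨k, hk, he, _⟩ := hg i h1 h2
    rw [he hk, PySem.List.pyGetD_eq_getElem para1 0 (by omega) (by omega)]
    exact PySem.List.sorted_id_getElem_mono para (by omega) (by rw [hp1] at hk; exact hk)
  unfold pvInter
  rw [← hp1, ← hs]
  constructor
  · intro y hy
    rw [List.mem_map] at hy
    obtain ⟨i, hi, hyi⟩ := hy
    rw [PySem.List.mem_pyRange_one] at hi
    rw [← hyi]
    exact hbase i hi.1 (by omega)
  · rw [List.pairwise_map]
    apply (PySem.List.pairwise_lt_pyRange_one 1 (Nbin+1)).imp_of_mem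
    intro a b ha hb hab
    rw [PySem.List.mem_pyRange_one] at ha hb
    exact hmono a b ha.1 (le_of_lt hab) (by omega)

lemma pvInter_length (Nbin : Int) (para : List Int) (_h : 0 < Nbin) :
    (pvInter Nbin para).length = Nbin.toNat + 1 := by
  unfold pvInter
  simp [PySem.List.length_pyRange_one]

-- membership in half-open cell i of a nondecreasing boundary list ↔ bisect_right lands at i+1
lemma bin_iff (inter : List Int) (hpair : inter.Pairwise (· ≤ ·)) (x i : Int)
    (hi0 : 0 ≤ i) (hi1 : i + 1 < (inter.length : Int)) :
    (PySem.List.pyGetD inter i 0 ≤ x ∧ x < PySem.List.pyGetD inter (i+1) 0) ↔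
      ((PySem.List.bisectRight inter x : Int) - 1 = i) := by
  obtain ⟨hle, hlt1, hlt2⟩ := PySem.List.bisectRight_spec inter x hpair
  have hil : i.toNat + 1 < inter.length := by omega
  rw [PySem.List.pyGetD_eq_getElem inter 0 hi0 (by omega),
      PySem.List.pyGetD_eq_getElem inter 0 (by omega) (by omega)]
  have htn : (i+1).toNat = i.toNat + 1 := by omega
  simp only [htn]
  constructor
  · rintro ⟨h1, h2⟩
    have ha : i.toNat < PySem.List.bisectRight inter x := by
      by_contra hc
      exact absurd (hlt2 i.toNat (by omega) (by omega)) (by omega)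
    have hb : PySem.List.bisectRight inter x ≤ i.toNat + 1 := by
      by_contra hc
      exact absurd (hlt1 (i.toNat + 1) hil (by omega)) (by omega)
    omega
  · intro hr
    have hr' : PySem.List.bisectRight inter x = i.toNat + 1 := by omega
    exact ⟨hlt1 i.toNat (by omega) (by omega), hlt2 (i.toNat + 1) hil (by omega)⟩

-- A's outer loop: writing tem(i) into slot i of a length-n list, for i = 0..n-1, yields the map.
lemma foldl_pySetD_aux (g : Int → List Int) : ∀ (n : Nat) (init : List (List Int)), n ≤ init.length →
    (PySem.List.pyRange 0 (n:Int) 1).foldl (fun acc i => PySem.List.pySetD acc i (g i)) init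
      = (PySem.List.pyRange 0 (n:Int) 1).map g ++ init.drop n := by
  intro n
  induction n with
  | zero => intro init _; simp [PySem.List.pyRange_one_eq_nil (le_refl 0)]
  | succ n ih =>
    intro init hlen
    have hn : ((n+1 : Nat) : Int) = (n : Int) + 1 := by push_cast; ring
    rw [hn, PySem.List.pyRange_one_succ_right (by positivity), List.foldl_append, List.map_append,
        ih init (by omega)]
    have hlt : n < init.length := by omega
    simp only [List.foldl_cons, List.foldl_nil, List.map_cons, List.map_nil]
    rw [show ((n : Int)) = ((n : Nat) : Int) from rfl, PySem.List.pySetD_natCast,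
        List.set_append, List.drop_eq_getElem_cons hlt]
    simp [PySem.List.length_pyRange_one]
    rw [List.drop_eq_getElem_cons hlt, List.set_cons_zero]

-- B's loop invariant: after scanning j = 0..t-1, slot m holds exactly the j with b j = m.
lemma foldl_bin (N : Nat) (b : Int → Int) : ∀ (t : Nat),
    (PySem.List.pyRange 0 (t:Int) 1).foldl
      (fun acc j => if 0 ≤ b j ∧ b j < (N:Int) then
          PySem.List.pySetD acc (b j) (PySem.List.pyGetD acc (b j) ([] : List Int) ++ [j]) else acc)
      ((PySem.List.pyRange 0 (N:Int) 1).map (fun _ => ([] : List Int)))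
      = (PySem.List.pyRange 0 (N:Int) 1).map
          (fun m => (PySem.List.pyRange 0 (t:Int) 1).filter (fun j => decide (b j = m))) := by
  intro t
  induction t with
  | zero =>
    simp [PySem.List.pyRange_one_eq_nil (le_refl 0)]
  | succ t ih =>
    have hn : ((t+1 : Nat) : Int) = (t : Int) + 1 := by push_cast; ring
    rw [hn, PySem.List.pyRange_one_succ_right (by positivity), List.foldl_append, ih]
    simp only [List.foldl_cons, List.foldl_nil]
    by_cases hc : 0 ≤ b (t:Int) ∧ b (t:Int) < (N:Int)
    · rw [if_pos hc]
      rw [PySem.List.pyGetD_map_pyRange_of_nonneg _ _ _ _ hc.1 hc.2]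
      rw [PySem.List.pySetD_of_nonneg (h := hc.1)]
      apply List.ext_getElem
      · simp [PySem.List.length_pyRange_one]
      · intro p hp hq
        simp only [PySem.List.length_pyRange_one, List.length_set, List.length_map] at hp hq
        have hpN : p < N := by simpa [PySem.List.length_pyRange_one] using hq
        rw [List.getElem_set, List.getElem_map, List.getElem_map,
            PySem.List.getElem_pyRange_one, List.filter_append]
        by_cases hpk : p = (b (t:Int)).toNat
        · rw [if_pos hpk.symm]
          have hbp : b (t:Int) = (p : Int) := by omega
          simp [← hbp]
        · rw [if_neg (fun h => hpk h.symm)]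
          have hbp : ¬ (b (t:Int) = (p : Int)) := by
            intro h; apply hpk; omega
          simp [hbp]
    · rw [if_neg hc]
      apply List.map_congr_left
      intro m hm
      rw [PySem.List.mem_pyRange_one] at hm
      rw [List.filter_append]
      have : ¬ (b (t:Int) = m) := by intro h; exact hc (by omega)
      simp [this]

-- ===== VERDICT (by name: the statement is the Claim_ definition above) =====
theorem ave_split_spec : Claim_equal_ave_split := by
  intro Nbin para _ hpre
  unfold Spec_ave_split
  rcases hpre with hneg | ⟨hN, hne⟩
  · simp [ave_split, ave_split_alt,
      PySem.List.pyRange_one_eq_nil (by omega : Nbin + 1 ≤ 0),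
      PySem.List.pyRange_one_eq_nil (by omega : Nbin ≤ 0),
      if_pos (le_of_lt hneg), Int.toNat_of_nonpos (le_of_lt hneg)]
  · simp only [ave_split, ave_split_alt, if_neg (not_le.mpr hN)]
    rw [interA_eq Nbin para hN]
    rw [show (PySem.List.pyGetD (PySem.List.sorted para (fun x => x) false) 0 0 ::
      (PySem.List.pyRange 1 (Nbin+1) 1).map (fun i =>
        PySem.List.pyGetD (PySem.List.sorted para (fun x => x) false)
          (i * PySem.Int.floordiv (para.length : Int) Nbin - 1) 0)) = pvInter Nbin para from rfl]
    simp only [Prod.mk.injEq]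
    refine ⟨trivial, ?_⟩
    have hpair := pvInter_pairwise Nbin para hN hne
    have hlen := pvInter_length Nbin para hN
    have hNb : Nbin = ((Nbin.toNat : Nat) : Int) := (Int.toNat_of_nonneg hN.le).symm
    set N := Nbin.toNat with hNdef
    rw [hNb]
    rw [foldl_bin N (fun j => ((PySem.List.bisectRight (pvInter (N : Int) para)
          (PySem.List.pyGetD para j 0) : Int) - 1)) para.length]
    rw [foldl_pySetD_aux _ N (List.replicate N []) (by simp)]
    simp only [List.drop_replicate, Nat.sub_self, List.replicate_zero, List.append_nil]
    apply List.map_congr_left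
    intro i hi
    rw [PySem.List.mem_pyRange_one] at hi
    rw [PySem.List.foldl_append_ite_eq_filter, List.nil_append]
    apply List.filter_congr
    intro j _
    simp only [decide_eq_decide]
    rw [hNb] at hpair hlen
    exact bin_iff (pvInter (N : Int) para) hpair (PySem.List.pyGetD para j 0) i hi.1
      (by rw [hlen]; push_cast; omega)
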